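-- pv_equiv track=rewrite | github.com/larsselstad/python-code-examples | c22-4-1_generators.py | pow_arr
-- ===== SOURCE A (Python) =====
-- def pow_arr(arr, exponent):
--     values = []
--     for x in arr:
--         p = 1
--         for _ in range(exponent):
--             p *= x
--         values.append(p)
--     return values
-- ===== SOURCE B (Python) =====
-- def pow_arr(arr, exponent):
--     values = []
--     for x in arr:
--         result = 1
--         base = x
--         e = exponent
--         while e > 0:
--             if e & 1:
--                 result *= base
--             base *= base
--             e >>= 1
--         values.append(result)
--     return values
-- ===== Notes on version B (the rewrite author's own statement) =====
-- stated objective: faster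
-- what changed: The inner loop of exponent repeated multiplications is replaced by exponentiation by squaring (binary exponentiation), reducing per-element work from exponent to log(exponent) multiplications; non-positive exponents naturally yield 1 in both.
import Mathlib
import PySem

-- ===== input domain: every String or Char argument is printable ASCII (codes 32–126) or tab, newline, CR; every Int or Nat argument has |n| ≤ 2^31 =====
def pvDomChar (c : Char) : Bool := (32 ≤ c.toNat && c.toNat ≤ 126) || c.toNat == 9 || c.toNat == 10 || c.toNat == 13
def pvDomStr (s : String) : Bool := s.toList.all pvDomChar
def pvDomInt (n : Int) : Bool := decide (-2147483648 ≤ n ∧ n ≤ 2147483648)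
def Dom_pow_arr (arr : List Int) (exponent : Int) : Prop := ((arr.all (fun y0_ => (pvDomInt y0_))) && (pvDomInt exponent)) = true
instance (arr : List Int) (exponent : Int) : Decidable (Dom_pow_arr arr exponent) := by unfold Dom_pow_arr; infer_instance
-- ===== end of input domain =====

-- B replaces A's inner loop of `exponent` multiplications by exponentiation by
-- squaring (log(exponent) multiplications per element); same return value everywhere.

-- ===== PORT A =====
-- for x in arr: p = 1; for _ in range(exponent): p *= x; values.append(p)
def pow_arr (arr : List Int) (exponent : Int) : List Int :=
  arr.foldl (fun values x =>
    values ++ [(PySem.List.pyRange 0 exponent 1).foldl (fun p _ => p * x) 1]) []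

-- ===== PORT B =====
-- while e > 0: if e & 1: result *= base; base *= base; e >>= 1
-- (for e > 0, Python's `e & 1` is `e % 2` and `e >>= 1` is `e / 2`; both exact here)
def pvBinLoop (result base e : Int) : Int :=
  if _h : 0 < e then
    pvBinLoop (if e % 2 = 1 then result * base else result) (base * base) (e / 2)
  else result
termination_by e.toNat
decreasing_by omega

def pow_arr_alt (arr : List Int) (exponent : Int) : List Int :=
  arr.foldl (fun values x => values ++ [pvBinLoop 1 x exponent]) []

-- ===== PRECONDITION & SPEC =====
def Spec_pow_arr (arr : List Int) (exponent : Int) (out : List Int) : Prop := out = pow_arr_alt arr exponent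
instance (arr : List Int) (exponent : Int) (out : List Int) : Decidable (Spec_pow_arr arr exponent out) := by unfold Spec_pow_arr; infer_instance

-- ===== CLAIM (what is proved, stated in full; the proofs are below) =====
def Claim_equal_pow_arr : Prop := ∀ (arr : List Int) (exponent : Int), Dom_pow_arr arr exponent → Spec_pow_arr arr exponent (pow_arr arr exponent)

-- ===== LEMMAS AND PROOFS =====

lemma foldl_mul_const (x : Int) (l : List Int) (p : Int) :
    l.foldl (fun p _ => p * x) p = p * x ^ l.length := by
  induction l generalizing p with
  | nil => simp
  | cons a t ih => simp [List.foldl, ih, pow_succ]; ring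

lemma pvBinLoop_eq (result base e : Int) :
    pvBinLoop result base e = result * base ^ e.toNat := by
  induction result, base, e using pvBinLoop.induct with
  | case1 result base e h ih =>
    rw [pvBinLoop, dif_pos h]
    simp only [dite_eq_ite] at ih
    rw [ih]
    have hk : e.toNat = 2 * (e / 2).toNat + (e % 2).toNat := by omega
    have hbb : (base * base) ^ (e / 2).toNat = base ^ (2 * (e / 2).toNat) := by
      rw [two_mul, pow_add, mul_pow]
    by_cases hodd : e % 2 = 1
    · have : (e % 2).toNat = 1 := by omega
      rw [if_pos hodd, hk, this, pow_add, hbb]; ring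
    · have : (e % 2).toNat = 0 := by omega
      rw [if_neg hodd, hk, this, pow_add, hbb]; ring
  | case2 result base e h =>
    rw [pvBinLoop, dif_neg h]
    have : e.toNat = 0 := by omega
    simp [this]

lemma foldl_append_map {α : Type} (f : α → Int) (arr : List α) (acc : List Int) :
    arr.foldl (fun values x => values ++ [f x]) acc = acc ++ arr.map f := by
  induction arr generalizing acc with
  | nil => simp
  | cons a t ih => simp [List.foldl, ih]

-- ===== VERDICT (by name: the statement is the Claim_ definition above) =====
theorem pow_arr_spec : Claim_equal_pow_arr := by
  intro arr exponent _
  unfold Spec_pow_arr pow_arr pow_arr_alt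
  rw [foldl_append_map, foldl_append_map]
  simp only [List.nil_append]
  apply List.map_congr_left
  intro x _
  rw [foldl_mul_const, pvBinLoop_eq, PySem.List.length_pyRange_one, one_mul, one_mul]
  norm_num
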